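-- pv_equiv track=rewrite | github.com/uedaLabR/nanoEvo | alignment/RealignUtils.py | convertRefToReadPos
-- ===== SOURCE A (Python) =====
-- def convertRefToReadPos(n,cigar):
--
--     cigseqlen = 0
--     cnovN = 0
--     readpos = 0
--     refpos = 0
--     for cigaroprator, cigarlen in cigar:
--
--         if  cigaroprator == 0:
--
--             if n<= refpos + cigarlen:
--                 return readpos + (n-refpos)
--
--             readpos += cigarlen
--             refpos  +=  cigarlen
--
--         elif  cigaroprator == 1: #Ins
--
--             readpos +=  cigarlen
--
--         elif  cigaroprator == 2: #Del
--
--             if n <= refpos + cigarlen: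
--                 return readpos
--
--             refpos  += cigarlen
--
--     return cnovN
-- ===== SOURCE B (Python) =====
-- def convertRefToReadPos(n, cigar):
--     # Pass 1: build the table of ref-consuming segments
--     # (ref_start, ref_end, read_start, kind) for match (0) and del (2) ops.
--     segs = []
--     readpos = 0
--     refpos = 0
--     for op, ln in cigar:
--         if op == 0:
--             segs.append((refpos, refpos + ln, readpos, 0))
--             readpos += ln
--             refpos += ln
--         elif op == 1:
--             readpos += ln
--         elif op == 2:
--             segs.append((refpos, refpos + ln, readpos, 2))
--             refpos += ln
--     # Pass 2: look n up in the segment table.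
--     for rs, re, rd, kind in segs:
--         if n <= re:
--             return rd + (n - rs) if kind == 0 else rd
--     return 0
-- ===== Notes on version B (the rewrite author's own statement) =====
-- stated objective: alternative
-- what changed: A fuses lookup into one loop over the CIGAR; B first builds a table of ref-consuming segments (ref_start, ref_end, read_start, kind) in one pass, then looks n up in that table in a separate scan.
import Mathlib
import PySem

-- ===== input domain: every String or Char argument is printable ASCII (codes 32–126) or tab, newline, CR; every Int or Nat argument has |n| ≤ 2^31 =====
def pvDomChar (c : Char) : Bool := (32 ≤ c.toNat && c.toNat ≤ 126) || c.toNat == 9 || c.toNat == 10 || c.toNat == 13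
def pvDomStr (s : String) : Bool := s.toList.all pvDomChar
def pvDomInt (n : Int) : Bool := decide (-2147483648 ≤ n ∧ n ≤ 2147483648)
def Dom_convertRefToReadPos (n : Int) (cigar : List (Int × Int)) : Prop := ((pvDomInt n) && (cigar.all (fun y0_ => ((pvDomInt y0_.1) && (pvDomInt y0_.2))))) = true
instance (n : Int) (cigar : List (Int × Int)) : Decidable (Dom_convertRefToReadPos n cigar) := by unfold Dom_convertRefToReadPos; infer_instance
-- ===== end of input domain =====

-- B separates A's fused loop into two passes: build a segment table, then look n up in it (alternative decomposition, same cost).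


-- ===== PORT A =====
def convertRefToReadPosGoA (n : Int) : List (Int × Int) → Int → Int → Int
  | [], _, _ => 0
  | (op, len) :: rest, readpos, refpos =>
    if op = 0 then
      if n ≤ refpos + len then readpos + (n - refpos)
      else convertRefToReadPosGoA n rest (readpos + len) (refpos + len)
    else if op = 1 then convertRefToReadPosGoA n rest (readpos + len) refpos
    else if op = 2 then
      if n ≤ refpos + len then readpos
      else convertRefToReadPosGoA n rest readpos (refpos + len)
    else convertRefToReadPosGoA n rest readpos refpos

def convertRefToReadPos (n : Int) (cigar : List (Int × Int)) : Int :=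
  convertRefToReadPosGoA n cigar 0 0

-- ===== PORT B =====
-- Pass 1 of B: the segment table (ref_start, ref_end, read_start, kind).
def buildSegs : List (Int × Int) → Int → Int → List (Int × Int × Int × Int)
  | [], _, _ => []
  | (op, len) :: rest, readpos, refpos =>
    if op = 0 then (refpos, refpos + len, readpos, 0) :: buildSegs rest (readpos + len) (refpos + len)
    else if op = 1 then buildSegs rest (readpos + len) refpos
    else if op = 2 then (refpos, refpos + len, readpos, 2) :: buildSegs rest readpos (refpos + len)
    else buildSegs rest readpos refpos

-- Pass 2 of B: scan the table for the first segment with n ≤ ref_end.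
def lookupSeg (n : Int) : List (Int × Int × Int × Int) → Int
  | [] => 0
  | (rs, re, rd, kind) :: rest =>
    if n ≤ re then (if kind = 0 then rd + (n - rs) else rd) else lookupSeg n rest

def convertRefToReadPos_alt (n : Int) (cigar : List (Int × Int)) : Int :=
  lookupSeg n (buildSegs cigar 0 0)

-- ===== PRECONDITION & SPEC =====
def Spec_convertRefToReadPos (n : Int) (cigar : List (Int × Int)) (out : Int) : Prop := out = convertRefToReadPos_alt n cigar
instance (n : Int) (cigar : List (Int × Int)) (out : Int) : Decidable (Spec_convertRefToReadPos n cigar out) := by unfold Spec_convertRefToReadPos; infer_instance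

-- ===== CLAIM (what is proved, stated in full; the proofs are below) =====
def Claim_equal_convertRefToReadPos : Prop := ∀ (n : Int) (cigar : List (Int × Int)), Dom_convertRefToReadPos n cigar → Spec_convertRefToReadPos n cigar (convertRefToReadPos n cigar)

-- ===== LEMMAS AND PROOFS =====

-- ===== VERDICT (by name: the statement is the Claim_ definition above) =====
lemma goA_eq_lookup (n : Int) : ∀ (cigar : List (Int × Int)) (readpos refpos : Int),
    convertRefToReadPosGoA n cigar readpos refpos = lookupSeg n (buildSegs cigar readpos refpos) := by
  intro cigar
  induction cigar with
  | nil => intro readpos refpos; simp [convertRefToReadPosGoA, buildSegs, lookupSeg]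
  | cons hd rest ih =>
    intro readpos refpos
    obtain ⟨op, len⟩ := hd
    simp only [convertRefToReadPosGoA, buildSegs]
    split_ifs with h0 h1 h2 hd2 <;> simp [lookupSeg, *]

theorem convertRefToReadPos_spec : Claim_equal_convertRefToReadPos := by
  intro n cigar _
  unfold Spec_convertRefToReadPos convertRefToReadPos convertRefToReadPos_alt
  exact goA_eq_lookup n cigar 0 0
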